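-- pv_equiv track=rewrite | github.com/coral-lab-asu/integrityshield | backend/app/services/pipeline/auto_mapping_strategy.py | build_index_reference
-- ===== SOURCE A (Python) =====
-- from typing import Dict, Iterable, List, Optional, Sequence, Tuple
--
-- def build_index_reference(text: str, limit: int = 320) -> str:
--     trimmed = text[:limit]
--     rows: List[str] = []
--     bucket: List[str] = []
--     for idx, ch in enumerate(trimmed):
--         if ch == " ":
--             display = "␠"
--         elif ch == "\n":
--             display = "\\n"
--         elif ch == "\t":
--             display = "\\t"
--         elif ch == "\r":
--             display = "\\r"
--         else:
--             display = ch
--         bucket.append(f"{idx:03}:{display}")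
--         if len(bucket) == 8:
--             rows.append(" ".join(bucket))
--             bucket = []
--     if bucket:
--         rows.append(" ".join(bucket))
--     if len(text) > limit:
--         rows.append(f"… truncated after {limit} characters")
--     return "\n".join(rows)
-- ===== SOURCE B (Python) =====
-- def build_index_reference(text: str, limit: int = 320) -> str:
--     trimmed = text[:limit]
--     tokens = []
--     for idx, ch in enumerate(trimmed):
--         if ch == " ":
--             display = "\u2420"
--         elif ch == "\n":
--             display = "\\n"
--         elif ch == "\t":
--             display = "\\t"
--         elif ch == "\r":
--             display = "\\r"
--         else:
--             display = ch
--         tokens.append(f"{idx:03}:{display}")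
--     rows = [" ".join(tokens[i:i + 8]) for i in range(0, len(tokens), 8)]
--     if len(text) > limit:
--         rows.append(f"\u2026 truncated after {limit} characters")
--     return "\n".join(rows)
-- ===== Notes on version B (the rewrite author's own statement) =====
-- stated objective: alternative
-- what changed: Replaces A's single pass with a running 8-element bucket that flushes into rows with two phases: build the flat token list, then chunk it into rows of 8 by index-stepped slicing (range(0, len, 8)).
import Mathlib
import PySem

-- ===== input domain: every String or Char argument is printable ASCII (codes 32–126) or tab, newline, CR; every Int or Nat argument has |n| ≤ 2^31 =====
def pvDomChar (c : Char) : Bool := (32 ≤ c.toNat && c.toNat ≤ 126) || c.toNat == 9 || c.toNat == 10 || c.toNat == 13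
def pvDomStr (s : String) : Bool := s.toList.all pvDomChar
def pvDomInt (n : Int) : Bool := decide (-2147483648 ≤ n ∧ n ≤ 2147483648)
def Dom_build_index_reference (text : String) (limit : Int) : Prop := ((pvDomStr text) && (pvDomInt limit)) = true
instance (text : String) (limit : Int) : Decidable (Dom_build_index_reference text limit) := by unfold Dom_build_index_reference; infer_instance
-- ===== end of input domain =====

-- B builds the flat token list first and then chunks it into rows of 8 by index-stepped
-- slicing, instead of A's single pass with a bucket accumulator that flushes at 8;
-- same cost, different decomposition.

-- shared helpers (this code is identical in both Pythons: the display mapping and f"{idx:03}:{display}")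
def briDisplay (c : Char) : List Char :=
  if c = ' ' then ['␠']
  else if c = '\n' then ['\\', 'n']
  else if c = '\t' then ['\\', 't']
  else if c = '\r' then ['\\', 'r']
  else [c]

-- f"{idx:03}" for the nonnegative indices enumerate produces: str(idx) zero-padded to width 3
def briPad3 (i : Int) : List Char :=
  let s := PySem.Int.toChars i
  List.replicate (3 - s.length) '0' ++ s

def briToken (i : Int) (c : Char) : String :=
  String.ofList (briPad3 i ++ ':' :: briDisplay c)

def briTruncRow (limit : Int) : String :=
  String.ofList ("… truncated after ".toList ++ PySem.Int.toChars limit ++ " characters".toList)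

-- ===== PORT A =====
def build_index_reference (text : String) (limit : Int) : String :=
  let trimmed := (PySem.Str.slice text none (some limit)).toList
  let st := (PySem.List.enumerate trimmed).foldl
    (fun (st : List String × List String) p =>
      let bucket := st.2 ++ [briToken p.1 p.2]
      if bucket.length = 8 then (st.1 ++ [PySem.Str.join " " bucket], [])
      else (st.1, bucket))
    ([], [])
  let rows := if st.2 = [] then st.1 else st.1 ++ [PySem.Str.join " " st.2]
  let rows := if limit < PySem.Str.len text then rows ++ [briTruncRow limit] else rows
  PySem.Str.join "\n" rows

-- ===== PORT B =====
def build_index_reference_alt (text : String) (limit : Int) : String :=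
  let trimmed := (PySem.Str.slice text none (some limit)).toList
  let tokens := (PySem.List.enumerate trimmed).map (fun p => briToken p.1 p.2)
  let rows := (PySem.List.pyRange 0 (tokens.length : Int) 8).map
    (fun i => PySem.Str.join " " (PySem.List.slice tokens (some i) (some (i + 8))))
  let rows := if limit < PySem.Str.len text then rows ++ [briTruncRow limit] else rows
  PySem.Str.join "\n" rows

-- ===== PRECONDITION & SPEC =====
def Spec_build_index_reference (text : String) (limit : Int) (out : String) : Prop := out = build_index_reference_alt text limit
instance (text : String) (limit : Int) (out : String) : Decidable (Spec_build_index_reference text limit out) := by unfold Spec_build_index_reference; infer_instance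

-- ===== CLAIM (what is proved, stated in full; the proofs are below) =====
def Claim_equal_build_index_reference : Prop := ∀ (text : String) (limit : Int), Dom_build_index_reference text limit → Spec_build_index_reference text limit (build_index_reference text limit)

-- ===== LEMMAS AND PROOFS =====

-- the common row decomposition: rows of 8 tokens joined by spaces
def chunkJoin (ts : List String) : List String :=
  if ts = [] then [] else PySem.Str.join " " (ts.take 8) :: chunkJoin (ts.drop 8)
termination_by ts.length
decreasing_by
  rename_i h
  have := List.length_pos_of_ne_nil h
  simp only [List.length_drop]
  omega

def briStep (st : List String × List String) (t : String) : List String × List String :=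
  let bucket := st.2 ++ [t]
  if bucket.length = 8 then (st.1 ++ [PySem.Str.join " " bucket], []) else (st.1, bucket)

def briFlush (st : List String × List String) : List String :=
  if st.2 = [] then st.1 else st.1 ++ [PySem.Str.join " " st.2]

lemma chunkJoin_nil : chunkJoin [] = [] := by
  rw [chunkJoin.eq_def]
  simp

lemma foldA_eq_chunkJoin (ts : List String) :
    ∀ (rows bucket : List String), bucket.length < 8 →
      briFlush (ts.foldl briStep (rows, bucket)) = rows ++ chunkJoin (bucket ++ ts) := by
  induction ts with
  | nil =>
    intro rows bucket h
    by_cases hb : bucket = []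
    · simp [hb, briFlush, chunkJoin_nil]
    · have ht : bucket.take 8 = bucket := List.take_of_length_le (by omega)
      have hd : bucket.drop 8 = [] := List.drop_of_length_le (by omega)
      rw [List.foldl_nil, List.append_nil, chunkJoin.eq_def, if_neg hb, ht, hd, chunkJoin_nil]
      simp [briFlush, hb]
  | cons t ts ih =>
    intro rows bucket h
    simp only [List.foldl_cons]
    by_cases h8 : (bucket ++ [t]).length = 8
    · rw [show briStep (rows, bucket) t = (rows ++ [PySem.Str.join " " (bucket ++ [t])], []) by
        simp only [briStep, if_pos h8]]
      rw [ih _ _ (by simp)]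
      have hsplit : bucket ++ t :: ts = (bucket ++ [t]) ++ ts := by simp
      have h1 : ((bucket ++ [t]) ++ ts).take 8 = bucket ++ [t] := by
        rw [List.take_append_of_le_length (by omega), List.take_of_length_le (by omega)]
      have h2 : ((bucket ++ [t]) ++ ts).drop 8 = ts := by
        rw [List.drop_append_of_le_length (by omega), List.drop_of_length_le (by omega)]
        simp
      have key : chunkJoin (bucket ++ t :: ts) = PySem.Str.join " " (bucket ++ [t]) :: chunkJoin ts := by
        rw [chunkJoin.eq_def, if_neg (by simp), hsplit, h1, h2]
      rw [key]
      simp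
    · have h7 : ¬ bucket.length = 7 := by simp at h8; omega
      rw [show briStep (rows, bucket) t = (rows, bucket ++ [t]) by
        simp [briStep, h7]]
      rw [ih _ _ (by simp; omega)]
      simp

lemma chunkJoin_eq_range (ts : List String) :
    (List.range (if (0:Int) < (ts.length : Int) then (((ts.length : Int) - 0 + 8 - 1) / 8).toNat else 0)).map
        (fun k => PySem.Str.join " " ((ts.drop (8 * k)).take 8)) = chunkJoin ts := by
  by_cases hnil : ts = []
  · simp [hnil, chunkJoin_nil]
  · have hlen : 0 < ts.length := List.length_pos_of_ne_nil hnil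
    have hlen' : (0:Int) < (ts.length : Int) := by exact_mod_cast hlen
    have hc : (if (0:Int) < (ts.length : Int) then (((ts.length : Int) - 0 + 8 - 1) / 8).toNat else 0)
        = (if (0:Int) < ((ts.drop 8).length : Int) then ((((ts.drop 8).length : Int) - 0 + 8 - 1) / 8).toNat else 0) + 1 := by
      simp only [List.length_drop]
      by_cases h8 : ts.length ≤ 8
      · have h0 : ts.length - 8 = 0 := by omega
        rw [h0]
        rw [if_pos hlen', if_neg (by norm_num)]
        omega
      · have h8' : 8 < ts.length := by omega
        have hcast : ((ts.length - 8 : Nat) : Int) = (ts.length : Int) - 8 := by omega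
        rw [if_pos hlen', hcast, if_pos (by omega)]
        omega
    rw [hc, List.range_succ_eq_map]
    rw [chunkJoin.eq_def, if_neg hnil]
    simp only [List.map_cons, Nat.mul_zero, List.drop_zero, List.map_map]
    congr 1
    rw [← chunkJoin_eq_range (ts.drop 8)]
    apply List.map_congr_left
    intro k _
    simp only [Function.comp_apply, List.drop_drop]
    have h38 : 8 + 8 * k = 8 * (k + 1) := by ring
    rw [h38]
termination_by ts.length
decreasing_by
  simp only [List.length_drop]
  omega

lemma rangeB_eq_chunkJoin (ts : List String) :
    (PySem.List.pyRange 0 (ts.length : Int) 8).map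
        (fun i => PySem.Str.join " " (PySem.List.slice ts (some i) (some (i + 8)))) = chunkJoin ts := by
  rw [PySem.List.pyRange_of_pos 0 (ts.length : Int) (by norm_num), List.map_map]
  rw [← chunkJoin_eq_range ts]
  apply List.map_congr_left
  intro k _
  simp only [Function.comp_apply, zero_add]
  have h1 : (8 * (k : Int)) = ((8 * k : Nat) : Int) := by push_cast; ring
  have h2 : (((8 * k : Nat) : Int)) + 8 = ((8 * k : Nat) : Int) + ((8 : Nat) : Int) := by norm_num
  rw [h1, h2, PySem.List.slice_natCast_add]

-- ===== VERDICT (by name: the statement is the Claim_ definition above) =====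
theorem build_index_reference_spec : Claim_equal_build_index_reference := by
  intro text limit _
  unfold Spec_build_index_reference build_index_reference build_index_reference_alt
  have rows_eq : ∀ (l : List (Int × Char)),
      (fun st : List String × List String =>
          if st.2 = [] then st.1 else st.1 ++ [PySem.Str.join " " st.2])
        (l.foldl
          (fun (st : List String × List String) p =>
            if (st.2 ++ [briToken p.1 p.2]).length = 8 then
              (st.1 ++ [PySem.Str.join " " (st.2 ++ [briToken p.1 p.2])], [])
            else (st.1, st.2 ++ [briToken p.1 p.2]))
          ([], []))
      = (PySem.List.pyRange 0 ((l.map (fun p => briToken p.1 p.2)).length : Int) 8).map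
          (fun i => PySem.Str.join " "
            (PySem.List.slice (l.map (fun p => briToken p.1 p.2)) (some i) (some (i + 8)))) := by
    intro l
    have h1 : (l.foldl
          (fun (st : List String × List String) p =>
            if (st.2 ++ [briToken p.1 p.2]).length = 8 then
              (st.1 ++ [PySem.Str.join " " (st.2 ++ [briToken p.1 p.2])], [])
            else (st.1, st.2 ++ [briToken p.1 p.2]))
          ([], []))
        = (l.map (fun p => briToken p.1 p.2)).foldl briStep ([], []) := by
      rw [List.foldl_map]
      rfl
    rw [h1, rangeB_eq_chunkJoin]
    simpa [briFlush] using foldA_eq_chunkJoin (l.map (fun p => briToken p.1 p.2)) [] [] (by simp)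
  beta_reduce at rows_eq
  simp only []
  rw [rows_eq (PySem.List.enumerate (PySem.Str.slice text none (some limit)).toList)]
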